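-- pv_equiv track=rewrite | github.com/th3gstv/marky-md | main.py | italic
-- ===== SOURCE A (Python) =====
-- def italic(linha):
--     if linha.find("_") == -1:
--         return linha
--     sections = linha.split("_")
--     linha = ""
--     for i in range(0, len(sections), 2):
--         linha += sections[i]
--         if i+1 < len(sections):
--             linha += "\033[3m" + sections[i+1] + "\033[0m"
--     return linha
-- ===== SOURCE B (Python) =====
-- def italic(linha):
--     out = []
--     em = False
--     for c in linha:
--         if c == "_":
--             out.append("\033[0m" if em else "\033[3m")
--             em = not em
--         else:
--             out.append(c)
--     if em:
--         out.append("\033[0m")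
--     return "".join(out)
-- ===== Notes on version B (the rewrite author's own statement) =====
-- stated objective: simpler
-- what changed: Replaced splitting on underscores plus a stride-2 index loop that pairs sections with one linear character scan carrying an italic-on/off flag, closing italic at end of string if it is still open.
import Mathlib
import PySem

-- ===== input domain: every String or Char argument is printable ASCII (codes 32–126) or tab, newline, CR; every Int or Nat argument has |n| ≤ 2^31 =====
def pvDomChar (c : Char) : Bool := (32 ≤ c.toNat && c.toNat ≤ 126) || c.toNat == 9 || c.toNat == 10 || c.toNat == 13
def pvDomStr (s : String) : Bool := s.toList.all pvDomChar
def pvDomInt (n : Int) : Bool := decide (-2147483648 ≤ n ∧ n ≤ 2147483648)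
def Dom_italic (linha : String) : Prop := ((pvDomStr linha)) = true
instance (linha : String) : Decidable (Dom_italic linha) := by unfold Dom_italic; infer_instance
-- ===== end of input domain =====

-- B replaces A's split-into-sections-and-pair loop by a single character scan with an
-- italic-on/off flag (objective: simpler one-pass decomposition, same linear cost).

-- ===== PORT A =====
-- literal port of A; strings are handled on the List Char side (PySem.Chars), exact per PySem
def italic (linha : String) : String :=
  if PySem.Str.find linha "_" = -1 then linha
  else
    let sections := PySem.Chars.splitOn linha.toList "_".toList
    String.ofList <|
      (PySem.List.pyRange 0 sections.length 2).foldl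
        (fun acc i =>
          let acc := acc ++ PySem.List.pyGetD sections i []
          if i + 1 < (sections.length : Int) then
            acc ++ "\x1b[3m".toList ++ PySem.List.pyGetD sections (i + 1) [] ++ "\x1b[0m".toList
          else acc)
        []

-- ===== PORT B =====
-- literal port of Source B: one left fold over the characters carrying (output, italic flag)
def italic_alt (linha : String) : String :=
  let r := linha.toList.foldl
    (fun (p : List Char × Bool) c =>
      if c = '_' then
        (p.1 ++ (if p.2 then "\x1b[0m".toList else "\x1b[3m".toList), !p.2)
      else (p.1 ++ [c], p.2))
    ([], false)
  String.ofList (if r.2 then r.1 ++ "\x1b[0m".toList else r.1)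

-- ===== PRECONDITION & SPEC =====
def Spec_italic (linha : String) (out : String) : Prop := out = italic_alt linha
instance (linha : String) (out : String) : Decidable (Spec_italic linha out) := by unfold Spec_italic; infer_instance

-- ===== CLAIM (what is proved, stated in full; the proofs are below) =====
def Claim_equal_italic : Prop := ∀ (linha : String), Dom_italic linha → Spec_italic linha (italic linha)

-- ===== LEMMAS AND PROOFS =====

set_option maxRecDepth 4096

-- B's loop body, named for the proofs (definitionally equal to the lambda in italic_alt)
def stepB (p : List Char × Bool) (c : Char) : List Char × Bool :=
  if c = '_' then
    (p.1 ++ (if p.2 then "\x1b[0m".toList else "\x1b[3m".toList), !p.2)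
  else (p.1 ++ [c], p.2)

def prependFirst (c : Char) : List (List Char) → List (List Char)
  | [] => [[c]]
  | s :: rest => (c :: s) :: rest

-- structural model of Python's split('_') on a character list
def splitU : List Char → List (List Char)
  | [] => [[]]
  | c :: cs => if c = '_' then [] :: splitU cs else prependFirst c (splitU cs)

lemma splitU_ne_nil (cs : List Char) : splitU cs ≠ [] := by
  cases cs with
  | nil => simp [splitU]
  | cons c cs =>
    simp only [splitU]
    split_ifs
    · simp
    · cases h : splitU cs <;> simp [prependFirst]

-- prepend a prefix onto the first section
def consFirst (pre : List Char) : List (List Char) → List (List Char)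
  | [] => [pre]
  | s :: rest => (pre ++ s) :: rest

lemma consFirst_append (pre : List Char) (c : Char) (xs : List (List Char)) :
    consFirst (pre ++ [c]) xs = consFirst pre (prependFirst c xs) := by
  cases xs <;> simp [consFirst, prependFirst]

lemma consFirst_nil (xs : List (List Char)) (h : xs ≠ []) : consFirst [] xs = xs := by
  cases xs with
  | nil => exact absurd rfl h
  | cons s rest => simp [consFirst]

lemma splitOn_go_eq (fuel : Nat) :
    ∀ (l cur : List Char) (acc : List (List Char)), l.length ≤ fuel →
      PySem.Chars.splitOn.go ['_'] fuel l cur acc =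
        acc.reverse ++ consFirst cur.reverse (splitU l) := by
  induction fuel with
  | zero =>
    intro l cur acc h
    have : l = [] := by cases l <;> simp_all
    subst this
    simp [PySem.Chars.splitOn.go, splitU, consFirst]
  | succ fuel ih =>
    intro l cur acc h
    cases l with
    | nil => simp [PySem.Chars.splitOn.go, splitU, consFirst]
    | cons c rest =>
      by_cases hc : c = '_'
      · subst hc
        rw [show PySem.Chars.splitOn.go ['_'] (fuel+1) ('_' :: rest) cur acc
              = PySem.Chars.splitOn.go ['_'] fuel rest [] (cur.reverse :: acc) by
            simp [PySem.Chars.splitOn.go, List.isPrefixOf]]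
        rw [ih rest [] (cur.reverse :: acc) (by simpa using Nat.lt_succ_iff.mp (by simpa using h))]
        simp only [List.reverse_nil, List.reverse_cons]
        rw [consFirst_nil _ (splitU_ne_nil rest)]
        simp [splitU, consFirst]
      · rw [show PySem.Chars.splitOn.go ['_'] (fuel+1) (c :: rest) cur acc
              = PySem.Chars.splitOn.go ['_'] fuel rest (c :: cur) acc by
            simp [PySem.Chars.splitOn.go, List.isPrefixOf, Ne.symm hc]]
        rw [ih rest (c :: cur) acc (by simpa using Nat.lt_succ_iff.mp (by simpa using h))]
        simp only [List.reverse_cons, splitU, if_neg hc]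
        rw [consFirst_append]

lemma splitOn_eq_splitU (cs : List Char) :
    PySem.Chars.splitOn cs ['_'] = splitU cs := by
  rw [PySem.Chars.splitOn, splitOn_go_eq (cs.length + 1) cs [] [] (by omega)]
  simp [consFirst_nil _ (splitU_ne_nil cs)]

-- the output as a function of the sections and the current italic flag
def outS : Bool → List (List Char) → List Char
  | fl, [] => if fl then "\x1b[0m".toList else []
  | fl, [s] => if fl then s ++ "\x1b[0m".toList else s
  | fl, s :: r :: rest =>
      s ++ (if fl then "\x1b[0m".toList else "\x1b[3m".toList) ++ outS (!fl) (r :: rest)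

lemma outS_cons (fl : Bool) (s : List Char) (xs : List (List Char)) (h : xs ≠ []) :
    outS fl (s :: xs) =
      s ++ (if fl then "\x1b[0m".toList else "\x1b[3m".toList) ++ outS (!fl) xs := by
  cases xs with
  | nil => exact absurd rfl h
  | cons r rest => rfl

lemma outS_false_pair (s t : List Char) (rest : List (List Char)) :
    outS false (s :: t :: rest) =
      s ++ "\x1b[3m".toList ++ t ++ "\x1b[0m".toList ++ outS false rest := by
  cases rest with
  | nil => simp [outS]
  | cons u rest' =>
    rw [outS_cons false s (t :: u :: rest') (by simp)]
    simp only [Bool.not_false]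
    rw [outS_cons true t (u :: rest') (by simp)]
    simp [List.append_assoc]

-- the character-scan model: what B computes after the final close
def model : List Char → Bool → List Char
  | [], fl => if fl then "\x1b[0m".toList else []
  | c :: cs, fl =>
      if c = '_' then (if fl then "\x1b[0m".toList else "\x1b[3m".toList) ++ model cs (!fl)
      else c :: model cs fl

lemma outS_prependFirst (fl : Bool) (c : Char) (xs : List (List Char)) (h : xs ≠ []) :
    outS fl (prependFirst c xs) = c :: outS fl xs := by
  cases xs with
  | nil => exact absurd rfl h
  | cons s rest =>
    cases rest with
    | nil => cases fl <;> simp [prependFirst, outS]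
    | cons r rest' =>
      rw [show prependFirst c (s :: r :: rest') = (c :: s) :: r :: rest' from rfl,
          outS_cons fl (c :: s) (r :: rest') (by simp),
          outS_cons fl s (r :: rest') (by simp)]
      simp

lemma model_eq_outS (cs : List Char) : ∀ fl, model cs fl = outS fl (splitU cs) := by
  induction cs with
  | nil => intro fl; cases fl <;> simp [model, splitU, outS]
  | cons c cs ih =>
    intro fl
    by_cases hc : c = '_'
    · subst hc
      have h1 : splitU ('_' :: cs) = [] :: splitU cs := by simp [splitU]
      have h2 : model ('_' :: cs) fl
          = (if fl then "\x1b[0m".toList else "\x1b[3m".toList) ++ model cs (!fl) := by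
        simp [model]
      rw [h2, h1, outS_cons fl [] (splitU cs) (splitU_ne_nil cs), ih]
      simp
    · have h1 : splitU (c :: cs) = prependFirst c (splitU cs) := by simp [splitU, hc]
      have h2 : model (c :: cs) fl = c :: model cs fl := by simp [model, hc]
      rw [h2, h1, outS_prependFirst fl c (splitU cs) (splitU_ne_nil cs), ih]

-- B's fold computes `model`
lemma scan_model (cs : List Char) : ∀ (pre : List Char) (fl : Bool),
    (if (cs.foldl stepB (pre, fl)).2 then (cs.foldl stepB (pre, fl)).1 ++ "\x1b[0m".toList
     else (cs.foldl stepB (pre, fl)).1) = pre ++ model cs fl := by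
  induction cs with
  | nil => intro pre fl; cases fl <;> simp [model]
  | cons c cs ih =>
    intro pre fl
    by_cases hc : c = '_'
    · subst hc
      have hstep : stepB (pre, fl) '_'
          = (pre ++ (if fl then "\x1b[0m".toList else "\x1b[3m".toList), !fl) := by
        simp [stepB]
      rw [List.foldl_cons, hstep, ih]
      simp [model, List.append_assoc]
    · have hstep : stepB (pre, fl) c = (pre ++ [c], fl) := by simp [stepB, hc]
      rw [List.foldl_cons, hstep, ih]
      simp [model, hc]

-- step-2 range unfolds one element at a time
lemma pyRange_two_cons (a b : Int) (h : a < b) :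
    PySem.List.pyRange a b 2 = a :: PySem.List.pyRange (a + 2) b 2 := by
  rw [PySem.List.pyRange_of_pos a b (by norm_num),
      PySem.List.pyRange_of_pos (a + 2) b (by norm_num)]
  rw [if_pos h]
  have hcnt : ((b - a + 2 - 1) / 2).toNat =
      (if a + 2 < b then ((b - (a + 2) + 2 - 1) / 2).toNat else 0) + 1 := by
    split_ifs <;> omega
  rw [hcnt, List.range_succ_eq_map, List.map_cons, List.map_map]
  congr 1
  · simp
  · apply List.map_congr_left
    intro k _
    simp only [Function.comp_apply]
    push_cast
    ring

lemma pyRange_two_nil (a b : Int) (h : b ≤ a) : PySem.List.pyRange a b 2 = [] := by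
  rw [PySem.List.pyRange_of_pos a b (by norm_num), if_neg (by omega)]
  simp

-- A's loop over even indices produces `outS false` of the remaining sections
lemma foldA (full : List (List Char)) : ∀ (k : Nat) (acc : List Char),
    (PySem.List.pyRange (k : Int) full.length 2).foldl
        (fun acc i =>
          let acc := acc ++ PySem.List.pyGetD full i []
          if i + 1 < (full.length : Int) then
            acc ++ "\x1b[3m".toList ++ PySem.List.pyGetD full (i + 1) [] ++ "\x1b[0m".toList
          else acc) acc
      = acc ++ (if k < full.length then outS false (full.drop k) else []) := by
  intro k
  induction hn : full.length - k using Nat.strong_induction_on generalizing k with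
  | _ n ih =>
  intro acc
  by_cases hk : k < full.length
  · rw [pyRange_two_cons _ _ (by exact_mod_cast hk), List.foldl_cons]
    have hget : PySem.List.pyGetD full (k : Int) [] = full.getD k [] := by
      simp [PySem.List.pyGetD_natCast, List.getD]
    have hdropk : full.drop k = full.getD k [] :: full.drop (k + 1) := by
      rw [List.drop_eq_getElem_cons hk, List.getD_eq_getElem?_getD, List.getElem?_eq_getElem hk]
      rfl
    by_cases hk1 : k + 1 < full.length
    · have hcast : ((k : Int) + 1) = ((k + 1 : Nat) : Int) := by push_cast; ring
      have hget1 : PySem.List.pyGetD full ((k : Int) + 1) [] = full.getD (k + 1) [] := by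
        rw [hcast, PySem.List.pyGetD_natCast]
      have hdropk1 : full.drop (k + 1) = full.getD (k + 1) [] :: full.drop (k + 2) := by
        rw [List.drop_eq_getElem_cons hk1, List.getD_eq_getElem?_getD, List.getElem?_eq_getElem hk1]
        norm_num
      simp only [hget, hget1,
        if_pos (show (k : Int) + 1 < (full.length : Int) by exact_mod_cast hk1)]
      have h2 : ((k : Int) + 2) = ((k + 2 : Nat) : Int) := by push_cast; ring
      rw [h2, ih (full.length - (k + 2)) (by omega) (k + 2) rfl]
      rw [if_pos hk]
      by_cases hk2 : k + 2 < full.length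
      · rw [if_pos hk2, hdropk, hdropk1, outS_false_pair]
        simp [List.append_assoc]
      · rw [if_neg hk2]
        have hnil : full.drop (k + 2) = [] := by
          apply List.drop_eq_nil_of_le; omega
        rw [hdropk, hdropk1, hnil, outS_false_pair]
        simp [List.append_assoc, outS]
    · simp only [hget,
        if_neg (show ¬ ((k : Int) + 1 < (full.length : Int)) by exact_mod_cast hk1)]
      rw [pyRange_two_nil _ _ (by exact_mod_cast (show full.length ≤ k + 2 by omega))]
      simp only [List.foldl_nil]
      rw [if_pos hk, hdropk]
      have hnil : full.drop (k + 1) = [] := by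
        apply List.drop_eq_nil_of_le; omega
      rw [hnil]
      simp [outS]
  · rw [pyRange_two_nil _ _ (by exact_mod_cast (show full.length ≤ k by omega)), if_neg hk]
    simp

lemma no_underscore_splitU (cs : List Char) (h : '_' ∉ cs) : splitU cs = [cs] := by
  induction cs with
  | nil => rfl
  | cons c cs ih =>
    simp only [List.mem_cons, not_or] at h
    have hc : ¬ c = '_' := fun e => h.1 e.symm
    simp [splitU, hc, ih h.2, prependFirst]

lemma italic_alt_eq (linha : String) :
    italic_alt linha = String.ofList
      (if (linha.toList.foldl stepB ([], false)).2
       then (linha.toList.foldl stepB ([], false)).1 ++ "\x1b[0m".toList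
       else (linha.toList.foldl stepB ([], false)).1) := rfl

-- ===== VERDICT (by name: the statement is the Claim_ definition above) =====
theorem italic_spec : Claim_equal_italic := by
  intro linha _
  unfold Spec_italic
  rw [italic_alt_eq, scan_model linha.toList [] false, List.nil_append, model_eq_outS]
  unfold italic
  by_cases hf : PySem.Str.find linha "_" = -1
  · rw [if_pos hf]
    have hmem : '_' ∉ linha.toList := by
      rw [PySem.Str.find_eq_neg_one_iff] at hf
      simpa [List.singleton_infix_iff] using hf
    rw [no_underscore_splitU _ hmem]
    conv_lhs => rw [show linha = String.ofList linha.toList from String.ofList_toList.symm]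
    simp [outS]
  · rw [if_neg hf]
    simp only [show "_".toList = ['_'] from rfl, splitOn_eq_splitU]
    have hfold := foldA (splitU linha.toList) 0 []
    simp only [Nat.cast_zero, List.nil_append, List.drop_zero] at hfold
    rw [hfold, if_pos (by
      cases h : splitU linha.toList with
      | nil => exact absurd h (splitU_ne_nil _)
      | cons s rest => simp)]
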